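-- pv_equiv track=rewrite | github.com/wymcg/vid2led | vid2led/util.py | generate_coordinate_table
-- ===== SOURCE A (Python) =====
-- def generate_coordinate_table(width, height, serpentine=False, vertical=False, flip_horizontal=False):
--     table = {}
--
--     if not vertical:
--         # the matrix is wired horizontally (ie. every row is sequentially wired)
--         for y in range(0, height):
--             for x in range(0, width):
--                 if not serpentine or (y % 2 == 0):
--                     # normal orientation row (horizontal)
--                     # all rows of non-serpentine matrices are like this
--                     # every other row of serpentine matrices are like this
--                     table[(x, y)] = (y * width) + x
--                 else:
--                     # flipped orientation row (horizontal)
--                     # every other row of serpentine matrices is like this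
--                     table[(x, y)] = (y * width) + (width - x - 1)
--     else:
--         # the matrix is wired vertically (ie. each column is sequentially wired)
--         for x in range(0, width):
--             for y in range(0, height):
--                 if not serpentine or (x % 2 == 0):
--                     # normal orientation column (vertical)
--                     # all columns of non-serpentine matrices are like this
--                     # every other column of serpentine matrices are like this
--                     table[(x, y)] = (x * height) + y
--                 else:
--                     # flipped orientation row (vertical)
--                     # every other column of serpentine matrices are like this
--                     table[(x, y)] = (x * height) + (height - y - 1)
--
--     # flip the coordinate set if requested
--     if flip_horizontal:
--         # make a set to hold the coordinates we've already flipped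
--         swapped_coords = set()
--
--         # iterate through all keys
--         for coord in table.keys():
--             if coord not in swapped_coords:
--                 swap_coord = (width - coord[0] - 1, coord[1])
--
--                 # swap the coords
--                 table[coord], table[swap_coord] = table[swap_coord], table[coord]
--
--                 # mark both coords
--                 swapped_coords.add(coord)
--                 swapped_coords.add(swap_coord)
--
--
--     return table
-- ===== SOURCE B (Python) =====
-- def generate_coordinate_table(width, height, serpentine=False, vertical=False, flip_horizontal=False):
--     def index(x, y):
--         if vertical:
--             if serpentine and x % 2 != 0:
--                 return (x * height) + (height - y - 1)
--             return (x * height) + y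
--         if serpentine and y % 2 != 0:
--             return (y * width) + (width - x - 1)
--         return (y * width) + x
--
--     if vertical:
--         return {(x, y): index(width - x - 1 if flip_horizontal else x, y)
--                 for x in range(width) for y in range(height)}
--     return {(x, y): index(width - x - 1 if flip_horizontal else x, y)
--             for y in range(height) for x in range(width)}
-- ===== Notes on version B (the rewrite author's own statement) =====
-- stated objective: simpler
-- what changed: B replaces A's two passes (build the dict, then a second flip pass that swaps mirrored values with a visited-set) by a single comprehension that computes each index directly at the mirrored x, with no mutation or bookkeeping.
import Mathlib
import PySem

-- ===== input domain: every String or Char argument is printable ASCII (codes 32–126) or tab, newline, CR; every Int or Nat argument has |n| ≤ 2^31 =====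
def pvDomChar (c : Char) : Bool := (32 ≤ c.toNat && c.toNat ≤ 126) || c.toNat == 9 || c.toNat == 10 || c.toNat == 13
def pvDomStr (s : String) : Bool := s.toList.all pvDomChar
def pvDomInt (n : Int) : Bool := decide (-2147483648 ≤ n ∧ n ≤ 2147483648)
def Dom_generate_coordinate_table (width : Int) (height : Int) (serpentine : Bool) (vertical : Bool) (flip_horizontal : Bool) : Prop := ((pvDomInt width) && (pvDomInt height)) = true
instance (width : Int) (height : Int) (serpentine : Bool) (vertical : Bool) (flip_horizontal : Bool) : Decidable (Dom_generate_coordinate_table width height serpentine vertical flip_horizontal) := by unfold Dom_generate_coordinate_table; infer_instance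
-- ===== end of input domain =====

-- B folds A's second flip-the-values pass (with its visited-set bookkeeping) into the single
-- build loop by computing each index at the mirrored x up front; objective: simpler.
-- Both programs return a dict rendered here as the List of (x, y, index) triples in insertion order.

-- ===== PORT A =====
def generate_coordinate_table (width : Int) (height : Int) (serpentine : Bool) (vertical : Bool) (flip_horizontal : Bool) : List (Int × Int × Int) :=
  let table : PySem.Dict (Int × Int) Int :=
    if !vertical then
      (PySem.List.pyRange 0 height 1).foldl (fun t y =>
        (PySem.List.pyRange 0 width 1).foldl (fun t x =>
          if !serpentine || (PySem.Int.mod y 2 == 0) then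
            t.insert (x, y) (y * width + x)
          else
            t.insert (x, y) (y * width + (width - x - 1))) t) PySem.Dict.empty
    else
      (PySem.List.pyRange 0 width 1).foldl (fun t x =>
        (PySem.List.pyRange 0 height 1).foldl (fun t y =>
          if !serpentine || (PySem.Int.mod x 2 == 0) then
            t.insert (x, y) (x * height + y)
          else
            t.insert (x, y) (x * height + (height - y - 1))) t) PySem.Dict.empty
  let table :=
    if flip_horizontal then
      -- 'table[coord]'/'table[swap_coord]': both keys are always present, so the getD default 0 is unreachable
      (table.keys.foldl (fun (st : PySem.Dict (Int × Int) Int × PySem.Set (Int × Int)) coord =>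
        if PySem.Set.contains st.2 coord then st
        else
          ((st.1.insert coord (st.1.getD (width - coord.1 - 1, coord.2) 0)).insert
              (width - coord.1 - 1, coord.2) (st.1.getD coord 0),
           PySem.Set.add (PySem.Set.add st.2 coord) (width - coord.1 - 1, coord.2)))
        (table, PySem.Set.empty)).1
    else table
  table.items.map (fun p => (p.1.1, p.1.2, p.2))

-- ===== PORT B =====
-- B's per-coordinate index helper (Source B's nested 'index' function)
def gctAltIndex (width : Int) (height : Int) (serpentine : Bool) (vertical : Bool) (x : Int) (y : Int) : Int :=
  if vertical then
    if serpentine && !(PySem.Int.mod x 2 == 0) then (x * height) + (height - y - 1)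
    else (x * height) + y
  else
    if serpentine && !(PySem.Int.mod y 2 == 0) then (y * width) + (width - x - 1)
    else (y * width) + x

def generate_coordinate_table_alt (width : Int) (height : Int) (serpentine : Bool) (vertical : Bool) (flip_horizontal : Bool) : List (Int × Int × Int) :=
  if vertical then
    (PySem.List.pyRange 0 width 1).flatMap (fun x => (PySem.List.pyRange 0 height 1).map (fun y =>
      (x, y, gctAltIndex width height serpentine vertical
        (if flip_horizontal then width - x - 1 else x) y)))
  else
    (PySem.List.pyRange 0 height 1).flatMap (fun y => (PySem.List.pyRange 0 width 1).map (fun x =>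
      (x, y, gctAltIndex width height serpentine vertical
        (if flip_horizontal then width - x - 1 else x) y)))

-- ===== PRECONDITION & SPEC =====
def Spec_generate_coordinate_table (width : Int) (height : Int) (serpentine : Bool) (vertical : Bool) (flip_horizontal : Bool) (out : List (Int × Int × Int)) : Prop := out = generate_coordinate_table_alt width height serpentine vertical flip_horizontal
instance (width : Int) (height : Int) (serpentine : Bool) (vertical : Bool) (flip_horizontal : Bool) (out : List (Int × Int × Int)) : Decidable (Spec_generate_coordinate_table width height serpentine vertical flip_horizontal out) := by unfold Spec_generate_coordinate_table; infer_instance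

-- ===== CLAIM (what is proved, stated in full; the proofs are below) =====
def Claim_equal_generate_coordinate_table : Prop := ∀ (width : Int) (height : Int) (serpentine : Bool) (vertical : Bool) (flip_horizontal : Bool), Dom_generate_coordinate_table width height serpentine vertical flip_horizontal → Spec_generate_coordinate_table width height serpentine vertical flip_horizontal (generate_coordinate_table width height serpentine vertical flip_horizontal)

-- ===== LEMMAS AND PROOFS =====

-- mirror of a coordinate under flip_horizontal
def gctMirror (width : Int) (c : Int × Int) : Int × Int := (width - c.1 - 1, c.2)

theorem gctMirror_invol (width : Int) (c : Int × Int) : gctMirror width (gctMirror width c) = c := by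
  obtain ⟨a, b⟩ := c
  simp only [gctMirror, Prod.mk.injEq]
  exact ⟨by omega, trivial⟩

-- A's index formula, as a function of the coordinate
def gctFA (width : Int) (height : Int) (serpentine : Bool) (vertical : Bool) (c : Int × Int) : Int :=
  if !vertical then
    if !serpentine || (PySem.Int.mod c.2 2 == 0) then c.2 * width + c.1
    else c.2 * width + (width - c.1 - 1)
  else
    if !serpentine || (PySem.Int.mod c.1 2 == 0) then c.1 * height + c.2
    else c.1 * height + (height - c.2 - 1)

theorem gctFA_eq_alt (width height : Int) (serpentine vertical : Bool) (c : Int × Int) :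
    gctFA width height serpentine vertical c = gctAltIndex width height serpentine vertical c.1 c.2 := by
  cases serpentine <;> cases vertical <;>
    simp [gctFA, gctAltIndex] <;> split_ifs <;> first | rfl | (exfalso; omega)

-- the key list, in A's (and B's) insertion order
def gctL (width height : Int) (vertical : Bool) : List (Int × Int) :=
  if vertical then
    (PySem.List.pyRange 0 width 1).flatMap (fun x => (PySem.List.pyRange 0 height 1).map (fun y => (x, y)))
  else
    (PySem.List.pyRange 0 height 1).flatMap (fun y => (PySem.List.pyRange 0 width 1).map (fun x => (x, y)))

theorem gctL_mem (width height : Int) (vertical : Bool) (c : Int × Int) :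
    c ∈ gctL width height vertical ↔ (0 ≤ c.1 ∧ c.1 < width ∧ 0 ≤ c.2 ∧ c.2 < height) := by
  obtain ⟨x, y⟩ := c
  cases vertical <;>
    simp [gctL, List.mem_flatMap, PySem.List.mem_pyRange_one] <;>
    constructor <;> (intro h; try obtain ⟨a, ha, hb⟩ := h) <;> omega

theorem gctL_nodup (width height : Int) (vertical : Bool) : (gctL width height vertical).Nodup := by
  cases vertical
  · simp only [gctL, Bool.false_eq_true, if_false]
    rw [List.nodup_flatMap]
    refine ⟨fun a _ => (PySem.List.nodup_pyRange_one _ _).map (fun u v huv => by simpa using huv), ?_⟩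
    refine List.Pairwise.imp ?_ (PySem.List.pairwise_lt_pyRange_one (a := 0) (b := height))
    intro a b hab p hp hq
    simp only [List.mem_map] at hp hq
    obtain ⟨u, _, rfl⟩ := hp
    obtain ⟨v, _, h⟩ := hq
    cases h
    omega
  · simp only [gctL, if_true]
    rw [List.nodup_flatMap]
    refine ⟨fun a _ => (PySem.List.nodup_pyRange_one _ _).map (fun u v huv => by simpa using huv), ?_⟩
    refine List.Pairwise.imp ?_ (PySem.List.pairwise_lt_pyRange_one (a := 0) (b := width))
    intro a b hab p hp hq
    simp only [List.mem_map] at hp hq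
    obtain ⟨u, _, rfl⟩ := hp
    obtain ⟨v, _, h⟩ := hq
    cases h
    omega

theorem gctL_mirror_closed (width height : Int) (vertical : Bool) (c : Int × Int)
    (h : c ∈ gctL width height vertical) : gctMirror width c ∈ gctL width height vertical := by
  rw [gctL_mem] at *
  simp only [gctMirror]
  omega

-- the build phase produces the association list over gctL
theorem gct_build_items (L : List (Int × Int)) (F : Int × Int → Int) (hnd : L.Nodup) :
    (L.foldl (fun d k => d.insert k (F k)) PySem.Dict.empty).items = L.map (fun k => (k, F k)) := by
  have h := PySem.Dict.items_foldl_insert_fresh L id F PySem.Dict.empty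
    (fun a _ => by simp [PySem.Dict.contains_empty]) (by simpa using hnd)
  simpa [PySem.Dict.items] using h

-- the flip pass: processing the remaining keys turns every value into F (mirror k)
theorem gct_flip_fold (width : Int) (F : Int × Int → Int) (L p rest : List (Int × Int))
    (hL : L = p ++ rest) (hnd : L.Nodup)
    (hclosed : ∀ k ∈ L, gctMirror width k ∈ L)
    (d : PySem.Dict (Int × Int) Int) (s : PySem.Set (Int × Int))
    (hd : d.items = L.map (fun k => (k, if k ∈ p ∨ gctMirror width k ∈ p then F (gctMirror width k) else F k)))
    (hs : ∀ k, PySem.Set.contains s k = true ↔ (k ∈ p ∨ gctMirror width k ∈ p)) :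
    ((rest.foldl (fun (st : PySem.Dict (Int × Int) Int × PySem.Set (Int × Int)) coord =>
        if PySem.Set.contains st.2 coord then st
        else
          ((st.1.insert coord (st.1.getD (width - coord.1 - 1, coord.2) 0)).insert
              (width - coord.1 - 1, coord.2) (st.1.getD coord 0),
           PySem.Set.add (PySem.Set.add st.2 coord) (width - coord.1 - 1, coord.2)))
        (d, s)).1).items
    = L.map (fun k => (k, if k ∈ L ∨ gctMirror width k ∈ L then F (gctMirror width k) else F k)) := by
  induction rest generalizing p d s with
  | nil =>
    rw [List.append_nil] at hL
    subst hL
    simpa using hd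
  | cons c rest ih =>
    subst hL
    have hnd' := hnd
    rw [List.nodup_append] at hnd'
    have hcp : c ∉ p := fun hin => hnd'.2.2 c hin c (by simp) rfl
    have hcL : c ∈ p ++ c :: rest := by simp
    have hMcL : gctMirror width c ∈ p ++ c :: rest := hclosed c hcL
    rw [List.foldl_cons]
    by_cases hc : PySem.Set.contains s c = true
    · simp only [hc, if_true]
      have hMcp : gctMirror width c ∈ p := by
        rcases (hs c).mp hc with h | h
        · exact absurd h hcp
        · exact h
      have hiff : ∀ k, (k ∈ p ∨ gctMirror width k ∈ p) ↔
          (k ∈ p ++ [c] ∨ gctMirror width k ∈ p ++ [c]) := by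
        intro k
        refine ⟨fun h => Or.imp (fun hh => List.mem_append.mpr (Or.inl hh)) (fun hh => List.mem_append.mpr (Or.inl hh)) h, ?_⟩
        rintro (h | h)
        · rcases List.mem_append.mp h with h | h
          · exact Or.inl h
          · simp only [List.mem_singleton] at h
            subst h
            exact Or.inr hMcp
        · rcases List.mem_append.mp h with h | h
          · exact Or.inr h
          · simp only [List.mem_singleton] at h
            have hk : k = gctMirror width c := by
              have := congrArg (gctMirror width) h
              rwa [gctMirror_invol] at this
            subst hk
            exact Or.inl hMcp
      refine ih (p ++ [c]) (by simp) d s ?_ ?_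
      · rw [hd]
        exact List.map_congr_left (fun k hk => by rw [if_congr (hiff k) rfl rfl])
      · exact fun k => (hs k).trans (hiff k)
    · -- c not yet swapped: swap the two values and mark both coordinates
      have hc' : PySem.Set.contains s c = false := by
        cases h : PySem.Set.contains s c
        · rfl
        · exact absurd h hc
      simp only [hc', Bool.false_eq_true, if_false]
      have hncp : ¬(c ∈ p ∨ gctMirror width c ∈ p) := fun h => hc ((hs c).mpr h)
      have hcp2 : c ∉ p := fun h => hncp (Or.inl h)
      have hMcp : gctMirror width c ∉ p := fun h => hncp (Or.inr h)
      have hMeq : ∀ k : Int × Int, gctMirror width k = c ↔ k = gctMirror width c := fun k =>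
        ⟨fun h => by rw [← h, gctMirror_invol], fun h => by rw [h, gctMirror_invol]⟩
      have hkeys : d.keys = p ++ c :: rest := by
        simp [PySem.Dict.keys, hd, List.map_map, Function.comp_def]
      have hknd : d.keys.Nodup := by rw [hkeys]; exact hnd
      have hvm : d.getD (gctMirror width c) 0 = F (gctMirror width c) := by
        refine PySem.Dict.getD_of_mem_items _ ?_ hknd 0
        rw [hd]
        refine List.mem_map.mpr ⟨gctMirror width c, hMcL, ?_⟩
        rw [if_neg (by rw [gctMirror_invol]; tauto)]
      have hvc : d.getD c 0 = F c := by
        refine PySem.Dict.getD_of_mem_items _ ?_ hknd 0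
        rw [hd]
        exact List.mem_map.mpr ⟨c, hcL, by rw [if_neg hncp]⟩
      have hMc : ((width - c.1 - 1, c.2) : Int × Int) = gctMirror width c := rfl
      rw [hMc, hvm, hvc]
      have hcc : d.contains c = true := (PySem.Dict.contains_iff_mem_keys _ _).mpr (hkeys ▸ hcL)
      have hcm : d.contains (gctMirror width c) = true :=
        (PySem.Dict.contains_iff_mem_keys _ _).mpr (hkeys ▸ hMcL)
      refine ih (p ++ [c]) (by simp) _ _ ?_ ?_
      · rw [PySem.Dict.items_insert_of_contains _ _ (by simp [PySem.Dict.contains_insert, hcm]),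
            PySem.Dict.items_insert_of_contains _ _ hcc, hd, List.map_map, List.map_map]
        refine List.map_congr_left (fun k hk => ?_)
        simp only [Function.comp_apply, beq_iff_eq]
        by_cases hk2 : k = c
        · have hT : k ∈ p ++ [c] ∨ gctMirror width k ∈ p ++ [c] := Or.inl (by simp [hk2])
          rw [if_pos hk2, if_pos hT]
          by_cases hcm2 : c = gctMirror width c
          · rw [if_pos hcm2, hk2, ← hcm2]
          · rw [if_neg hcm2, hk2]
        · by_cases hk1 : k = gctMirror width c
          · have hMk : gctMirror width k = c := (hMeq k).mpr hk1
            have hT : k ∈ p ++ [c] ∨ gctMirror width k ∈ p ++ [c] := Or.inr (by simp [hMk])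
            rw [if_neg hk2, if_pos hk1, if_pos hT, hMk, hk1]
          · have hMkc : gctMirror width k ≠ c := fun h => hk1 ((hMeq k).mp h)
            have hiff2 : (k ∈ p ++ [c] ∨ gctMirror width k ∈ p ++ [c]) ↔
                (k ∈ p ∨ gctMirror width k ∈ p) := by
              simp only [List.mem_append, List.mem_singleton, hk2, hMkc, or_false]
            rw [if_neg hk2, if_neg hk1, if_congr hiff2 rfl rfl]
      · intro k
        rw [PySem.Set.contains_iff, PySem.Set.mem_add, PySem.Set.mem_add,
            ← PySem.Set.contains_iff, hs k]
        simp only [List.mem_append, List.mem_singleton, hMeq k]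
        tauto


-- the two build loops, rewritten as an association list over gctL
theorem gct_build_h (w h : Int) (serp : Bool) :
    ((PySem.List.pyRange 0 h 1).foldl (fun t y =>
        (PySem.List.pyRange 0 w 1).foldl (fun t x =>
          if !serp || (PySem.Int.mod y 2 == 0) then
            t.insert (x, y) (y * w + x)
          else
            t.insert (x, y) (y * w + (w - x - 1))) t) PySem.Dict.empty).items
      = (gctL w h false).map (fun k => (k, gctFA w h serp false k)) := by
  rw [← gct_build_items (gctL w h false) (gctFA w h serp false) (gctL_nodup w h false)]
  congr 1
  simp only [gctL, Bool.false_eq_true, if_false, List.foldl_flatMap, List.foldl_map]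
  congr 1
  funext t y
  congr 1
  funext t x
  simp only [gctFA, Bool.not_false, if_true]
  split <;> rfl

theorem gct_build_v (w h : Int) (serp : Bool) :
    ((PySem.List.pyRange 0 w 1).foldl (fun t x =>
        (PySem.List.pyRange 0 h 1).foldl (fun t y =>
          if !serp || (PySem.Int.mod x 2 == 0) then
            t.insert (x, y) (x * h + y)
          else
            t.insert (x, y) (x * h + (h - y - 1))) t) PySem.Dict.empty).items
      = (gctL w h true).map (fun k => (k, gctFA w h serp true k)) := by
  rw [← gct_build_items (gctL w h true) (gctFA w h serp true) (gctL_nodup w h true)]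
  congr 1
  simp only [gctL, if_true, List.foldl_flatMap, List.foldl_map]
  congr 1
  funext t x
  congr 1
  funext t y
  simp only [gctFA, Bool.not_true, Bool.false_eq_true, if_false]
  split <;> rfl

-- a build dict followed by the flip pass, in terms of gctL
theorem gct_flipped_items (width height : Int) (vert : Bool) (F : Int × Int → Int)
    (d : PySem.Dict (Int × Int) Int)
    (hd : d.items = (gctL width height vert).map (fun k => (k, F k))) :
    (((d.keys).foldl (fun (st : PySem.Dict (Int × Int) Int × PySem.Set (Int × Int)) coord =>
        if PySem.Set.contains st.2 coord then st
        else
          ((st.1.insert coord (st.1.getD (width - coord.1 - 1, coord.2) 0)).insert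
              (width - coord.1 - 1, coord.2) (st.1.getD coord 0),
           PySem.Set.add (PySem.Set.add st.2 coord) (width - coord.1 - 1, coord.2)))
        (d, PySem.Set.empty)).1).items
      = (gctL width height vert).map (fun k => (k, F (gctMirror width k))) := by
  have hkeys : d.keys = gctL width height vert := by
    simp [PySem.Dict.keys, hd, List.map_map, Function.comp_def]
  rw [hkeys]
  have h := gct_flip_fold width F (gctL width height vert) [] (gctL width height vert) rfl
    (gctL_nodup width height vert)
    (fun k hk => gctL_mirror_closed width height vert k hk)
    d PySem.Set.empty (by simpa using hd) (by simp [PySem.Set.empty])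
  rw [h]
  refine List.map_congr_left (fun k hk => ?_)
  rw [if_pos (Or.inl hk)]

-- ===== VERDICT (by name: the statement is the Claim_ definition above) =====
theorem generate_coordinate_table_spec : Claim_equal_generate_coordinate_table := by
  intro w h serp vert flip _
  unfold Spec_generate_coordinate_table generate_coordinate_table generate_coordinate_table_alt
  cases vert
  · cases flip
    · simp only [Bool.not_false, if_true, Bool.false_eq_true, if_false]
      rw [gct_build_h, List.map_map]
      simp only [gctL, Bool.false_eq_true, if_false, List.map_flatMap, List.map_map]
      congr 1
      funext y
      congr 1
      funext x
      simp [gctFA_eq_alt]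
    · simp only [Bool.not_false, if_true, Bool.false_eq_true, if_false]
      rw [gct_flipped_items w h false _ _ (gct_build_h w h serp), List.map_map]
      simp only [gctL, Bool.false_eq_true, if_false, List.map_flatMap, List.map_map]
      congr 1
      funext y
      congr 1
      funext x
      simp [gctFA_eq_alt, gctMirror]
  · cases flip
    · simp only [Bool.not_true, Bool.false_eq_true, if_false, if_true]
      rw [gct_build_v, List.map_map]
      simp only [gctL, if_true, List.map_flatMap, List.map_map]
      congr 1
      funext x
      congr 1
      funext y
      simp [gctFA_eq_alt]
    · simp only [Bool.not_true, Bool.false_eq_true, if_false, if_true]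
      rw [gct_flipped_items w h true _ _ (gct_build_v w h serp), List.map_map]
      simp only [gctL, if_true, List.map_flatMap, List.map_map]
      congr 1
      funext x
      congr 1
      funext y
      simp [gctFA_eq_alt, gctMirror]
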